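-- pv_equiv track=rewrite | github.com/thiagowveiga/project-euler | p017.py | get_udc
-- ===== SOURCE A (Python) =====
-- def get_udc(n):
--     udc = []
--     k = str(n)
--     i = 0
--     while i < len(k):
--         if (len(k)-i == 2 and k[i] == '1'):
--             a = int(k[i:i+2])
--             if a != 0:
--                 udc.append(a)
--             break
--         a = int(k[i] + '0'*(len(k)-1-i))
--         if a != 0:
--             udc.append(a)
--         i += 1
--     return udc
-- ===== SOURCE B (Python) =====
-- def get_udc(n):
--     # Peel digits of abs(n) least-significant-first with divmod, tracking place value;
--     # the low two digits are handled together so 10..19 stay one "teen" component.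
--     m = abs(n)
--     m, r = divmod(m, 100)
--     comps = []
--     if 10 <= r <= 19:
--         comps.append(r)
--     else:
--         if r % 10:
--             comps.append(r % 10)
--         if r >= 20:
--             comps.append(r - r % 10)
--     place = 100
--     while m:
--         m, d = divmod(m, 10)
--         if d:
--             comps.append(d * place)
--         place *= 10
--     comps.reverse()
--     return comps
-- ===== Notes on version B (the rewrite author's own statement) =====
-- stated objective: alternative
-- what changed: Replaces A's str(n) left-to-right character scan (which builds and int()-parses a padded string per digit) by pure integer divmod peeling of abs(n) least-significant-first, handling the low two digits together for teens, then reversing the collected components.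
import Mathlib
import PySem

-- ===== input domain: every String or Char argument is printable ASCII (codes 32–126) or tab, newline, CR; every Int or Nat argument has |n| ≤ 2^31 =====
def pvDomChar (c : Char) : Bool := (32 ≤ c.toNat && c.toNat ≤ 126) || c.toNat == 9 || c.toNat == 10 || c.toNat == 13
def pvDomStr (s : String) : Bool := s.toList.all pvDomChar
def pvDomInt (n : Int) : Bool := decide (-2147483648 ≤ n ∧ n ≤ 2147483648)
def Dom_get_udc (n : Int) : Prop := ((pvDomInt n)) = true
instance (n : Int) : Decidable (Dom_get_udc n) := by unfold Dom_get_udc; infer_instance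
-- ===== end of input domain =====

-- B replaces A's str(n) character scan (one string build + int() parse per digit) by
-- pure-integer divmod peeling of abs(n), least-significant digit first, and a final reverse.

-- ===== PORT A =====
-- the while loop over i; i is always ≥ 0 in the Python loop, so k[i] is
-- PySem.List.pyGetD k (i:Int) ' ' (the loop guard keeps i in bounds, so the default is unreachable)
def get_udcGo (k : List Char) (i : Nat) (udc : List Int) : List Int :=
  if _h : i < k.length then
    if k.length - i = 2 ∧ PySem.List.pyGetD k (i : Int) ' ' = '1' then
      -- a = int(k[i:i+2]); int() never raises here (k[i:i+2] is digit chars), so getD 0 is unreachable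
      let a := (PySem.Int.ofChars? (PySem.List.slice k (some (i : Int)) (some ((i : Int) + (2 : Nat))))).getD 0
      if a ≠ 0 then udc ++ [a] else udc
    else
      -- a = int(k[i] + '0'*(len(k)-1-i)); int() never raises here either
      let a := (PySem.Int.ofChars? (PySem.List.pyGetD k (i : Int) ' ' :: List.replicate (k.length - 1 - i) '0')).getD 0
      get_udcGo k (i + 1) (if a ≠ 0 then udc ++ [a] else udc)
  else udc
termination_by k.length - i

def get_udc (n : Int) : List Int :=
  get_udcGo (PySem.Int.toChars n) 0 []

-- ===== PORT B =====
-- the `while m:` loop of Source B; m ≥ 0 at every call (it starts at abs(n)//100), so the guard is 0 < m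
def get_udc_altGo (m : Int) (place : Int) (comps : List Int) : List Int :=
  if _h : 0 < m then
    let d := PySem.Int.mod m 10
    get_udc_altGo (PySem.Int.floordiv m 10) (place * 10)
      (if d ≠ 0 then comps ++ [d * place] else comps)
  else comps
termination_by m.toNat
decreasing_by
  have h10 : (0:Int) < 10 := by norm_num
  rw [PySem.Int.floordiv_eq_ediv_of_pos h10]
  omega

def get_udc_alt (n : Int) : List Int :=
  let m0 := |n|
  let m := PySem.Int.floordiv m0 100
  let r := PySem.Int.mod m0 100
  let comps :=
    (if 10 ≤ r ∧ r ≤ 19 then [r]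
     else (if PySem.Int.mod r 10 ≠ 0 then [PySem.Int.mod r 10] else []) ++
          (if 20 ≤ r then [r - PySem.Int.mod r 10] else []))
  (get_udc_altGo m 100 comps).reverse

-- ===== PRECONDITION & SPEC =====
def Spec_get_udc (n : Int) (out : List Int) : Prop := out = get_udc_alt n
instance (n : Int) (out : List Int) : Decidable (Spec_get_udc n out) := by unfold Spec_get_udc; infer_instance

-- ===== CLAIM (what is proved, stated in full; the proofs are below) =====
def Claim_equal_get_udc : Prop := ∀ (n : Int), Dom_get_udc n → Spec_get_udc n (get_udc n)

-- ===== LEMMAS AND PROOFS =====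

-- A's per-position components, read off an MSB-first digit list
def gA : List Nat → List Int
  | [] => []
  | d :: rest =>
    if rest.length = 1 ∧ d = 1 then [10 + (rest.headI : Int)]
    else (if (d : Int) ≠ 0 then [(d : Int) * 10 ^ rest.length] else []) ++ gA rest

-- B's high components, read off an LSB-first digit list starting at place p
def emitHi : List Nat → Nat → List Int
  | [], _ => []
  | d :: t, p => (if d ≠ 0 then [(d : Int) * (p : Int)] else []) ++ emitHi t (p * 10)

-- B's low-two-digit components (r = m % 100), in the LSB-first emission order
def low2 (r : Nat) : List Int :=
  if 10 ≤ r ∧ r ≤ 19 then [(r : Int)]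
  else (if r % 10 ≠ 0 then [((r % 10 : Nat) : Int)] else []) ++
       (if 20 ≤ r then [((r - r % 10 : Nat) : Int)] else [])

lemma ofChars_digit_zeros : ∀ d < 10, ∀ z < 11,
    PySem.Int.ofChars? (Nat.digitChar d :: List.replicate z '0') = some ((d : Int) * 10 ^ z) := by
  decide

lemma ofChars_teen : ∀ u < 10,
    PySem.Int.ofChars? ['1', Nat.digitChar u] = some (10 + (u : Int)) := by decide

lemma ofChars_neg_zeros : ∀ z < 12, 1 ≤ z →
    PySem.Int.ofChars? ('-' :: List.replicate z '0') = some 0 := by decide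

lemma digitChar_eq_one_iff : ∀ d < 10, (Nat.digitChar d = '1' ↔ d = 1) := by decide

lemma pyGetD_cons_succ {α : Type} (c : α) (k : List α) (i : Nat) (d : α) :
    PySem.List.pyGetD (c :: k) (((i + 1 : Nat)) : Int) d = PySem.List.pyGetD k (i : Int) d := by
  rw [PySem.List.pyGetD_natCast, PySem.List.pyGetD_natCast]
  simp [List.getD]

lemma slice_cons_succ (c : Char) (k : List Char) (i : Nat) :
    PySem.List.slice (c :: k) (some ((i + 1 : Nat) : Int)) (some (((i + 1 : Nat) : Int) + (2:Nat)))
      = PySem.List.slice k (some (i : Int)) (some ((i : Int) + (2:Nat))) := by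
  rw [PySem.List.slice_natCast_add, PySem.List.slice_natCast_add]
  simp

lemma get_udcGo_shift (c : Char) : ∀ j k i udc, k.length - i ≤ j →
    get_udcGo (c :: k) (i + 1) udc = get_udcGo k i udc := by
  intro j
  induction j with
  | zero =>
    intro k i udc h
    conv_lhs => rw [get_udcGo]
    conv_rhs => rw [get_udcGo]
    simp only [List.length_cons]
    rw [dif_neg (by omega), dif_neg (by omega)]
  | succ j ih =>
    intro k i udc h
    conv_lhs => rw [get_udcGo]
    conv_rhs => rw [get_udcGo]
    simp only [List.length_cons]
    by_cases hlt : i < k.length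
    · rw [dif_pos (by omega), dif_pos hlt]
      have e1 : k.length + 1 - (i + 1) = k.length - i := by omega
      rw [e1, pyGetD_cons_succ, slice_cons_succ]
      have e3 : k.length + 1 - 1 - (i + 1) = k.length - 1 - i := by omega
      rw [e3]
      split
      · rfl
      · rw [ih k (i+1) _ (by omega)]
    · rw [dif_neg (by omega), dif_neg hlt]

lemma get_udcGo_digits (M : List Nat) (hd : ∀ d ∈ M, d < 10) (hlen : M.length ≤ 11) :
    ∀ j i udc, M.length - i ≤ j → get_udcGo (M.map Nat.digitChar) i udc = udc ++ gA (M.drop i) := by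
  intro j
  induction j with
  | zero =>
    intro i udc h
    rw [get_udcGo]
    rw [dif_neg (by simp; omega)]
    rw [List.drop_of_length_le (by omega)]
    simp [gA]
  | succ j ih =>
    intro i udc h
    by_cases hlt : i < M.length
    · have hdrop : M.drop i = M[i] :: M.drop (i + 1) := List.drop_eq_getElem_cons hlt
      have hdi : M[i] < 10 := hd _ (List.getElem_mem hlt)
      have hget : PySem.List.pyGetD (M.map Nat.digitChar) (i : Int) ' ' = Nat.digitChar M[i] := by
        rw [PySem.List.pyGetD_natCast, List.getD_eq_getElem _ _ (by simpa using hlt)]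
        simp
      conv_lhs => rw [get_udcGo]
      rw [dif_pos (by simpa using hlt)]
      simp only [List.length_map, hget]
      by_cases hc : M.length - i = 2 ∧ M[i] = 1
      · -- teen branch
        rw [if_pos ⟨hc.1, by rw [(digitChar_eq_one_iff _ hdi)]; exact hc.2⟩]
        have hlt1 : i + 1 < M.length := by omega
        have hdrop1 : M.drop (i+1) = M[i+1] :: M.drop (i + 2) := List.drop_eq_getElem_cons hlt1
        have hdrop2 : M.drop (i+2) = [] := List.drop_of_length_le (by omega)
        have hslice : PySem.List.slice (M.map Nat.digitChar) (some (i : Int)) (some ((i : Int) + (2:Nat)))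
            = ['1', Nat.digitChar M[i+1]] := by
          rw [PySem.List.slice_natCast_add, ← List.map_drop, hdrop, hdrop1, hdrop2]
          simp [(digitChar_eq_one_iff _ hdi).2 hc.2]
        rw [hslice, ofChars_teen _ (hd _ (List.getElem_mem hlt1))]
        have hu : (0:Int) ≤ (M[i+1] : Int) := by positivity
        rw [if_pos (by simp; omega)]
        rw [hdrop, hdrop1, hdrop2]
        simp [gA, hc.2]
      · -- generic branch
        have hteen : ¬(M.length - i = 2 ∧ Nat.digitChar M[i] = '1') := by
          rintro ⟨h1, h2⟩
          exact hc ⟨h1, (digitChar_eq_one_iff _ hdi).1 h2⟩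
        rw [if_neg hteen]
        have hz : M.length - 1 - i < 11 := by omega
        rw [ofChars_digit_zeros _ hdi _ hz]
        simp only [Option.getD_some]
        rw [ih (i+1) _ (by omega)]
        rw [hdrop]
        conv_rhs => rw [gA]
        have hrl : (M.drop (i+1)).length = M.length - 1 - i := by simp; omega
        rw [hrl]
        have hteen2 : ¬(M.length - 1 - i = 1 ∧ M[i] = 1) := by
          rintro ⟨h1, h2⟩
          exact hc ⟨by omega, h2⟩
        rw [if_neg hteen2]
        have hmul : ((M[i] : Int) * 10 ^ (M.length - 1 - i) ≠ 0) ↔ ((M[i] : Int) ≠ 0) := by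
          constructor
          · intro hne h0; exact hne (by rw [h0]; ring)
          · intro hne; exact mul_ne_zero hne (by positivity)
        by_cases hd0 : (M[i] : Int) ≠ 0
        · rw [if_pos (hmul.mpr hd0), if_pos hd0]
          simp
        · rw [if_neg (fun hx => hd0 (hmul.mp hx)), if_neg hd0]
          simp
    · rw [get_udcGo, dif_neg (by simp; omega), List.drop_of_length_le (by omega)]
      simp [gA]

lemma toDigitsCore_eq : ∀ (f n : Nat) (acc : List Char), 0 < n → n < f →
    Nat.toDigitsCore 10 f n acc = (Nat.digits 10 n).reverse.map Nat.digitChar ++ acc := by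
  intro f
  induction f with
  | zero => intro n acc h1 h2; omega
  | succ f ih =>
    intro n acc h1 h2
    rw [Nat.toDigitsCore]
    by_cases h10 : n / 10 = 0
    · simp only [h10]
      rw [Nat.digits_def' (by norm_num) h1]
      have : Nat.digits 10 (n / 10) = [] := by rw [h10]; simp
      rw [this]
      simp
    · rw [if_neg h10]
      rw [ih (n/10) _ (by omega) (by omega)]
      rw [Nat.digits_def' (by norm_num) h1]
      simp
lemma toDigits_eq (m : Nat) :
    Nat.toDigits 10 m = if m = 0 then ['0'] else ((Nat.digits 10 m).reverse.map Nat.digitChar) := by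
  by_cases h : m = 0
  · subst h; decide
  · rw [if_neg h, Nat.toDigits, toDigitsCore_eq _ _ _ (by omega) (by omega)]
    simp

lemma altGo_digits : ∀ (m2 : Nat), ∀ (p : Nat) (acc : List Int),
    get_udc_altGo (m2 : Int) (p : Int) acc = acc ++ emitHi (Nat.digits 10 m2) p := by
  intro m2
  induction m2 using Nat.strong_induction_on with
  | _ m2 ih =>
    intro p acc
    rw [get_udc_altGo]
    by_cases h : 0 < m2
    · rw [dif_pos (by exact_mod_cast h)]
      rw [show (10:Int) = ((10:Nat):Int) by norm_num]
      simp only [PySem.Int.mod_natCast, PySem.Int.floordiv_natCast]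
      rw [show ((p:Int) * ((10:Nat):Int)) = (((p * 10 : Nat)) : Int) by push_cast; ring]
      rw [ih (m2 / 10) (by omega) (p * 10)]
      rw [Nat.digits_def' (by norm_num) h]
      rw [emitHi]
      have hcast : ((m2 % 10 : Nat) : Int) ≠ 0 ↔ (m2 % 10) ≠ 0 := by exact_mod_cast Iff.rfl
      by_cases hz : m2 % 10 ≠ 0
      · rw [if_pos (hcast.mpr hz), if_pos hz]
        simp
      · rw [if_neg (fun hx => hz (hcast.mp hx)), if_neg hz]
        simp
    · have h0 : m2 = 0 := by omega
      subst h0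
      rw [dif_neg (by norm_num)]
      simp [emitHi]

lemma emitHi_append (xs : List Nat) (d : Nat) :
    ∀ p, emitHi (xs ++ [d]) p
      = emitHi xs p ++ (if d ≠ 0 then [(d : Int) * ((p : Int) * 10 ^ xs.length)] else []) := by
  induction xs with
  | nil => intro p; simp [emitHi]
  | cons x t ih =>
    intro p
    simp only [List.cons_append, emitHi, ih (p * 10)]
    rw [List.append_assoc]
    congr 2
    split
    · congr 1
      simp only [List.length_cons]
      push_cast
      ring
    · rfl

lemma gA_split : ∀ M : List Nat,
    gA M = (emitHi (M.reverse.drop 2) 100).reverse ++ gA (M.reverse.take 2).reverse := by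
  intro M
  induction M with
  | nil => simp [gA, emitHi]
  | cons d rest ih =>
    by_cases hr : rest.length ≤ 1
    · rw [List.drop_of_length_le (by simp; omega), List.take_of_length_le (by simp; omega)]
      simp [emitHi]
    · have h2 : 2 ≤ rest.length := by omega
      conv_lhs => rw [gA]
      rw [if_neg (by rintro ⟨h1, _⟩; omega), ih]
      have hrev : (d :: rest).reverse = rest.reverse ++ [d] := by simp
      rw [hrev, List.drop_append_of_le_length (by simp; omega),
          List.take_append_of_le_length (by simp; omega)]
      rw [emitHi_append]
      rw [List.reverse_append]
      have hexp : ((100:Nat) : Int) * 10 ^ (rest.reverse.drop 2).length = 10 ^ rest.length := by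
        simp only [List.length_drop, List.length_reverse]
        rw [show ((100:Nat):Int) = 10 ^ 2 by norm_num, ← pow_add]
        congr 1
        omega
      rw [hexp]
      by_cases hd0 : (d : Int) ≠ 0
      · have hd0' : d ≠ 0 := by exact_mod_cast hd0
        rw [if_pos hd0, if_pos hd0']
        simp
      · have hd0' : ¬ d ≠ 0 := by
          intro hx
          exact hd0 (by exact_mod_cast Nat.cast_ne_zero.mpr hx)
        rw [if_neg hd0, if_neg hd0']
        simp

lemma digits_drop2 (m : Nat) : (Nat.digits 10 m).drop 2 = Nat.digits 10 (m / 100) := by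
  by_cases h0 : m = 0
  · subst h0; simp
  · rw [Nat.digits_def' (by norm_num) (by omega)]
    by_cases h1 : m / 10 = 0
    · have : m / 100 = 0 := by omega
      rw [this]
      simp [h1]
    · rw [Nat.digits_def' (by norm_num) (by omega)]
      simp only [List.drop_succ_cons, List.drop_zero]
      congr 1
      omega

lemma gA_low2 (m : Nat) : gA (((Nat.digits 10 m).take 2).reverse) = (low2 (m % 100)).reverse := by
  have hgAu : ∀ u : Nat, gA [u] = (if (u : Int) ≠ 0 then [(u : Int)] else []) := by
    intro u
    rw [gA, if_neg (by simp)]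
    simp [gA]
  by_cases h0 : m = 0
  · subst h0; simp [gA, low2]
  by_cases h1 : m / 10 = 0
  · -- single digit: m < 10
    have hL : Nat.digits 10 m = [m % 10] := by
      rw [Nat.digits_def' (by norm_num) (by omega), h1]
      simp
    have hmm : m % 100 = m := by omega
    have hm10 : m % 10 = m := by omega
    rw [hL, hmm]
    have htake : (List.take 2 [m % 10]).reverse = [m % 10] := by simp
    rw [htake, hm10, hgAu]
    rw [low2, if_neg (show ¬(10 ≤ m ∧ m ≤ 19) from by omega),
        if_neg (show ¬(20 ≤ m) from by omega), hm10]
    by_cases hu : m ≠ 0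
    · rw [if_pos (by exact_mod_cast Nat.cast_ne_zero.mpr hu), if_pos hu]
      simp
    · rw [if_neg (by simpa using hu), if_neg hu]
      simp
  · -- m ≥ 10
    have hL : Nat.digits 10 m = m % 10 :: (m / 10) % 10 :: Nat.digits 10 (m / 100) := by
      rw [Nat.digits_def' (by norm_num) (by omega), Nat.digits_def' (by norm_num) (by omega),
        Nat.div_div_eq_div_mul]
    have hr : m % 100 = 10 * (m / 10 % 10) + m % 10 := by omega
    rw [hL]
    have htake : ((m % 10 :: m / 10 % 10 :: Nat.digits 10 (m / 100)).take 2).reverse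
        = [m / 10 % 10, m % 10] := by simp
    rw [htake]
    by_cases ht1 : m / 10 % 10 = 1
    · rw [ht1]
      rw [show gA [1, m % 10] = [10 + ((m % 10 : Nat) : Int)] from by simp [gA]]
      rw [low2, if_pos (show 10 ≤ m % 100 ∧ m % 100 ≤ 19 from by omega)]
      have : m % 100 = 10 + m % 10 := by omega
      rw [this]
      simp only [List.reverse_singleton]
      push_cast
      ring_nf
    · rw [gA, if_neg (by rintro ⟨_, h⟩; exact ht1 h), hgAu]
      simp only [List.length_cons, List.length_nil, zero_add, pow_one]
      rw [low2, if_neg (show ¬(10 ≤ m % 100 ∧ m % 100 ≤ 19) from by omega)]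
      have hsub : m % 100 - m % 100 % 10 = 10 * (m / 10 % 10) := by omega
      have hru : m % 100 % 10 = m % 10 := by omega
      rw [hsub, hru, List.reverse_append]
      by_cases ht0 : m / 10 % 10 = 0
      · rw [if_neg (show ¬(20 ≤ m % 100) from by omega),
          if_neg (show ¬((((m / 10 % 10 : Nat)) : Int) ≠ 0) from by
            simpa using (by exact_mod_cast congrArg (Nat.cast : Nat → Int) ht0 : ((m / 10 % 10 : Nat) : Int) = 0))]
        simp only [List.reverse_nil, List.nil_append]
        by_cases hu0 : m % 10 = 0
        · rw [if_neg (by simpa using (congrArg (Nat.cast : Nat → Int) hu0)), if_neg (by omega)]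
          simp
        · rw [if_pos (by exact_mod_cast Nat.cast_ne_zero.mpr hu0), if_pos hu0]
          simp
      · rw [if_pos (show 20 ≤ m % 100 from by omega),
          if_pos (by exact_mod_cast Nat.cast_ne_zero.mpr ht0)]
        have hc : ((10 * (m / 10 % 10) : Nat) : Int) = ((m / 10 % 10 : Nat) : Int) * 10 := by
          push_cast; ring
        rw [hc]
        simp only [List.reverse_singleton, List.cons_append, List.nil_append]
        by_cases hu0 : m % 10 = 0
        · rw [if_neg (by simpa using (congrArg (Nat.cast : Nat → Int) hu0)), if_neg (by omega)]
          simp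
        · rw [if_pos (by exact_mod_cast Nat.cast_ne_zero.mpr hu0), if_pos hu0]
          simp

lemma gA_digits (m : Nat) :
    gA ((Nat.digits 10 m).reverse)
      = (low2 (m % 100) ++ emitHi (Nat.digits 10 (m / 100)) 100).reverse := by
  rw [gA_split, List.reverse_reverse, digits_drop2, gA_low2, List.reverse_append]

-- the '-' head of str(n) for negative n contributes nothing and the loop moves on
lemma get_udcGo_neg_head (ds : List Char) (h1 : 1 ≤ ds.length) (h2 : ds.length ≤ 11) (udc : List Int) :
    get_udcGo ('-' :: ds) 0 udc = get_udcGo ds 0 udc := by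
  conv_lhs => rw [get_udcGo]
  rw [dif_pos (by simp)]
  have hg : PySem.List.pyGetD ('-' :: ds) ((0:Nat) : Int) ' ' = '-' := by
    rw [PySem.List.pyGetD_natCast]; rfl
  rw [show ((0:Int)) = (((0:Nat)) : Int) from rfl, hg]
  rw [if_neg (by rintro ⟨_, h⟩; exact absurd h (by decide))]
  have hrep : ('-' :: ds).length - 1 - 0 = ds.length := by simp
  rw [hrep, ofChars_neg_zeros ds.length (by omega) h1]
  simp only [Option.getD_some, ne_eq]
  rw [show (0:Nat) + 1 = 0 + 1 from rfl]
  exact get_udcGo_shift '-' (ds.length) ds 0 _ (by omega)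

lemma digits_facts (m : Nat) (hm : m ≤ 2147483648) :
    (∀ d ∈ (Nat.digits 10 m).reverse, d < 10) ∧ (Nat.digits 10 m).reverse.length ≤ 11 := by
  constructor
  · intro d hd
    exact Nat.digits_lt_base (by norm_num) (List.mem_reverse.mp hd)
  · have : (Nat.digits 10 m).length ≤ 10 :=
      (Nat.digits_length_le_iff (by norm_num) m).mpr (by omega)
    simp only [List.length_reverse]
    omega

-- A for a positive m computes gA of m's MSB-first digits
lemma get_udc_nat (m : Nat) (h0 : 0 < m) (hm : m ≤ 2147483648) :
    get_udcGo (Nat.toDigits 10 m) 0 [] = gA ((Nat.digits 10 m).reverse) := by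
  obtain ⟨hd, hl⟩ := digits_facts m hm
  rw [toDigits_eq, if_neg (by omega)]
  rw [get_udcGo_digits _ hd (by simpa using hl) _ 0 [] (le_refl _)]
  simp

-- B unwinds to the same digit decomposition
lemma get_udc_alt_nat (m : Nat) :
    get_udc_alt ((m : Nat) : Int)
      = (low2 (m % 100) ++ emitHi (Nat.digits 10 (m / 100)) 100).reverse := by
  show (get_udc_altGo (PySem.Int.floordiv |((m:Nat):Int)| 100) 100 _).reverse = _
  have habs : |((m:Nat):Int)| = ((m:Nat):Int) := abs_of_nonneg (by positivity)
  rw [habs, show (100:Int) = (((100:Nat)):Int) from rfl, show (10:Int) = (((10:Nat)):Int) from rfl]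
  simp only [PySem.Int.floordiv_natCast, PySem.Int.mod_natCast]
  have hcomps :
      (if (((10:Nat)) : Int) ≤ ((m % 100 : Nat) : Int) ∧ ((m % 100 : Nat) : Int) ≤ 19 then [((m % 100 : Nat) : Int)]
       else (if ((m % 100 % 10 : Nat) : Int) ≠ 0 then [((m % 100 % 10 : Nat) : Int)] else []) ++
            (if (20:Int) ≤ ((m % 100 : Nat) : Int) then [((m % 100 : Nat) : Int) - ((m % 100 % 10 : Nat) : Int)] else []))
      = low2 (m % 100) := by
    rw [low2]
    by_cases hteen : 10 ≤ m % 100 ∧ m % 100 ≤ 19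
    · rw [if_pos (by exact_mod_cast hteen), if_pos hteen]
    · rw [if_neg (by exact_mod_cast hteen), if_neg hteen]
      congr 1
      · by_cases hu : m % 100 % 10 = 0
        · rw [if_neg (by simpa using congrArg (Nat.cast : Nat → Int) hu), if_neg (by omega)]
        · rw [if_pos (by exact_mod_cast Nat.cast_ne_zero.mpr hu), if_pos hu]
      · by_cases h20 : 20 ≤ m % 100
        · rw [if_pos (by exact_mod_cast h20), if_pos h20]
          congr 1
          have : m % 100 % 10 ≤ m % 100 := Nat.mod_le _ _
          push_cast [this]
          ring
        · rw [if_neg (by exact_mod_cast h20), if_neg h20]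
  rw [hcomps, altGo_digits (m / 100) 100 (low2 (m % 100))]

-- ===== VERDICT (by name: the statement is the Claim_ definition above) =====
theorem get_udc_spec : Claim_equal_get_udc := by
  intro n hdom
  unfold Spec_get_udc
  have hm : n.natAbs ≤ 2147483648 := by
    unfold Dom_get_udc pvDomInt at hdom
    simp only [decide_eq_true_eq] at hdom
    omega
  by_cases h0 : n = 0
  · subst h0
    have hA : get_udc 0 = [] := by
      show get_udcGo (PySem.Int.toChars 0) 0 [] = []
      rw [show PySem.Int.toChars 0 = List.map Nat.digitChar [0] from by decide]
      rw [get_udcGo_digits [0] (by decide) (by decide) 1 0 [] (by decide)]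
      simp [gA]
    rw [hA, show (0:Int) = (((0:Nat)):Int) from rfl, get_udc_alt_nat]
    simp [low2, emitHi]
  have hpos : 0 < n.natAbs := by omega
  have hB : get_udc_alt n
      = (low2 (n.natAbs % 100) ++ emitHi (Nat.digits 10 (n.natAbs / 100)) 100).reverse := by
    have : get_udc_alt n = get_udc_alt ((n.natAbs : Nat) : Int) := by
      unfold get_udc_alt
      rw [Int.abs_eq_natAbs, Int.abs_eq_natAbs]
      simp
    rw [this, get_udc_alt_nat]
  rw [hB, ← gA_digits]
  unfold get_udc
  rcases Int.natAbs_eq n with he | he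
  · -- n ≥ 0
    have hn0 : ¬ n < 0 := by omega
    have : PySem.Int.toChars n = Nat.toDigits 10 n.natAbs := by
      unfold PySem.Int.toChars
      rw [if_neg hn0]
      congr 1
      omega
    rw [this, get_udc_nat _ hpos hm]
  · -- n < 0
    have hn0 : n < 0 := by omega
    have : PySem.Int.toChars n = '-' :: Nat.toDigits 10 n.natAbs := by
      unfold PySem.Int.toChars
      rw [if_pos hn0]
    rw [this]
    have hlen : 1 ≤ (Nat.toDigits 10 n.natAbs).length ∧ (Nat.toDigits 10 n.natAbs).length ≤ 11 := by
      obtain ⟨hd, hl⟩ := digits_facts n.natAbs hm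
      rw [toDigits_eq, if_neg (by omega)]
      have hnil : Nat.digits 10 n.natAbs ≠ [] := Nat.digits_ne_nil_iff_ne_zero.mpr (by omega)
      have hpos' := List.length_pos_of_ne_nil hnil
      constructor
      · simp only [List.length_map, List.length_reverse]
        omega
      · simpa using hl
    rw [get_udcGo_neg_head _ hlen.1 hlen.2, get_udc_nat _ hpos hm]
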